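-- pv_equiv track=rewrite | github.com/cosmosmining/IEEE_ISIT_bitsandbots | archive/main.py | replace_zero_with_next_non_zero
-- ===== SOURCE A (Python) =====
-- def replace_zero_with_next_non_zero(arr):
--     next_non_zero = None
--     for i in reversed(range(len(arr))):
--         if arr[i] != 0 and arr[i] != '0':
--             next_non_zero = arr[i]
--         elif next_non_zero is not None:
--             arr[i] = next_non_zero
--     return arr
-- ===== SOURCE B (Python) =====
-- def replace_zero_with_next_non_zero(arr):
--     # Single forward pass building a new list; zeros seen so far are buffered
--     # in `pending` and flushed (filled with x) when a non-zero x arrives;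
--     # trailing buffered zeros are appended unchanged.
--     # (Unlike A, does not mutate arr in place; the return value is the same.)
--     out = []
--     pending = []
--     for x in arr:
--         if x != 0 and x != '0':
--             out.extend([x] * len(pending))
--             pending.clear()
--             out.append(x)
--         else:
--             pending.append(x)
--     out.extend(pending)
--     return out
-- ===== Notes on version B (the rewrite author's own statement) =====
-- stated objective: alternative
-- what changed: Backward in-place scan carrying the next non-zero value is replaced by a forward pass that buffers pending zeros and flushes the buffer when a non-zero element arrives, building a new list.
import Mathlib
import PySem

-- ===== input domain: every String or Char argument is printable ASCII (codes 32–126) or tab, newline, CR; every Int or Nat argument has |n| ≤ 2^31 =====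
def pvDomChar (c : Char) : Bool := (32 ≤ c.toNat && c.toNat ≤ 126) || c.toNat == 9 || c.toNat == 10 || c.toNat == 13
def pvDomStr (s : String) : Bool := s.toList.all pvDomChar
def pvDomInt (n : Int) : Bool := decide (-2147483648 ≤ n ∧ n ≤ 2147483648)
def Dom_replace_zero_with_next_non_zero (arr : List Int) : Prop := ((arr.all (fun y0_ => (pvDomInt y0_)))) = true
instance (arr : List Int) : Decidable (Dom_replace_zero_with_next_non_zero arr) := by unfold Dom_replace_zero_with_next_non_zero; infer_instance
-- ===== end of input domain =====

-- ===== PORT A =====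
-- A mutates arr in place and returns it; the equivalence proved here is about the return value.
-- A iterates i over reversed(range(len(arr))): ported as structural recursion over arr.reverse,
-- each step reading the element and either updating next_non_zero or replacing the element.
-- On Int elements the test `arr[i] != '0'` is always true (int never equals str), so it drops out.
def aGo : List Int → Option Int → List Int
  | [], _ => []
  | x :: xs, nz =>
    if x ≠ 0 then x :: aGo xs (some x)
    else match nz with
      | some v => v :: aGo xs nz
      | none => x :: aGo xs nz

def replace_zero_with_next_non_zero (arr : List Int) : List Int :=
  (aGo arr.reverse none).reverse

-- ===== PORT B =====
-- state = (out, pending); on non-zero x flush pending filled with x, else buffer x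
def altStep (st : List Int × List Int) (x : Int) : List Int × List Int :=
  if x ≠ 0 then (st.1 ++ List.replicate st.2.length x ++ [x], [])
  else (st.1, st.2 ++ [x])

def replace_zero_with_next_non_zero_alt (arr : List Int) : List Int :=
  let st := arr.foldl altStep ([], [])
  st.1 ++ st.2

-- ===== PRECONDITION & SPEC =====
def Spec_replace_zero_with_next_non_zero (arr : List Int) (out : List Int) : Prop := out = replace_zero_with_next_non_zero_alt arr
instance (arr : List Int) (out : List Int) : Decidable (Spec_replace_zero_with_next_non_zero arr out) := by unfold Spec_replace_zero_with_next_non_zero; infer_instance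

-- ===== CLAIM (what is proved, stated in full; the proofs are below) =====
def Claim_equal_replace_zero_with_next_non_zero : Prop := ∀ (arr : List Int), Dom_replace_zero_with_next_non_zero arr → Spec_replace_zero_with_next_non_zero arr (replace_zero_with_next_non_zero arr)

-- ===== LEMMAS AND PROOFS =====

-- what out/pending the fold has produced after ys, as a function of the "next non-zero
-- to the right" nz that A's backward pass carries into ys
theorem agoB (ys : List Int) (nz : Option Int) :
    (aGo ys.reverse nz).reverse =
      (ys.foldl altStep ([], [])).1 ++
        (match nz with
          | none => (ys.foldl altStep ([], [])).2
          | some v => List.replicate (ys.foldl altStep ([], [])).2.length v) := by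
  induction ys using List.reverseRecOn generalizing nz with
  | nil => cases nz <;> simp [aGo]
  | append_singleton zs x ih =>
    obtain ⟨o, p, hst⟩ : ∃ o p, zs.foldl altStep ([], []) = (o, p) :=
      ⟨_, _, rfl⟩
    by_cases hx : x = 0
    · subst hx
      cases nz with
      | none =>
        simp [aGo, List.foldl_append, hst, altStep, ih none]
      | some v =>
        simp [aGo, List.foldl_append, hst, altStep, ih (some v),
          ← List.replicate_succ']
    · cases nz <;>
        simp [aGo, hx, List.foldl_append, hst, altStep, ih (some x)]

-- ===== VERDICT (by name: the statement is the Claim_ definition above) =====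
theorem replace_zero_with_next_non_zero_spec : Claim_equal_replace_zero_with_next_non_zero := by
  intro arr _
  show replace_zero_with_next_non_zero arr = _
  rw [replace_zero_with_next_non_zero, replace_zero_with_next_non_zero_alt, agoB arr none]
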